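-- pv_equiv track=rewrite | github.com/pwr-Solaar/Solaar | lib/logitech_receiver/rgb_effects_probe.py | _decode_cluster_info
-- ===== SOURCE A (Python) =====
-- _EFFECT_ID_NAMES = {
--     0x0000: "Static",
--     0x0001: "Effect 0x0001",
--     0x0006: "Effect 0x0006",
--     0x0007: "Effect 0x0007",
--     0x000F: "Effect 0x000F",
--     0x007F: "Effect 0x007F",
-- }
--
-- def _decode_cluster_info(resp) -> str | None:
--     """Decode a 0x0621 fn 0x10 getRGBClusterInfo reply into a readable
--     summary. Best-effort — returns None on unexpected length/shape.
--
--     Observed shape on G522: 4-byte records (effect_id LE u16, slot_idx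
--     LE u16). The effect_id at slot 0 is 0x0000 = "Static" (with RGB),
--     confirmed by pcap of G HUB color-set traffic. Records continue
--     until trailing-zero padding.
--
--     Note: most HID++ multi-byte fields are BE, but this particular
--     response uses LE — confirmed against captured factory-default bytes
--     on G522 where the values 0x0001 / 0x000F / 0x007F appear at byte 0
--     of each record with byte 1 = 0x00 (consistent with LE u16).
--     """
--     if not resp or len(resp) < 4:
--         return None
--     effects = []
--     seen_static = False
--     for i in range(0, len(resp) - 3, 4):
--         eid = resp[i] | (resp[i + 1] << 8)
--         slot = resp[i + 2] | (resp[i + 3] << 8)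
--         # Skip purely-zero padding once we've seen the (effect=0, slot=0) entry.
--         if eid == 0 and slot == 0:
--             if seen_static:
--                 continue
--             seen_static = True
--         name = _EFFECT_ID_NAMES.get(eid, f"0x{eid:04X}")
--         effects.append(f"slot={slot}:{name}")
--     return ", ".join(effects) if effects else None
-- ===== SOURCE B (Python) =====
-- _EFFECT_ID_NAMES = {
--     0x0000: "Static",
--     0x0001: "Effect 0x0001",
--     0x0006: "Effect 0x0006",
--     0x0007: "Effect 0x0007",
--     0x000F: "Effect 0x000F",
--     0x007F: "Effect 0x007F",
-- }
--
--
-- def _decode_cluster_info(resp) -> str | None: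
--     """Chunk via a shared iterator (zip truncates the tail), then split the
--     record list at the first all-zero record: everything up to and including
--     it is kept verbatim, zeros after it are dropped by a filter."""
--     if not resp or len(resp) < 4:
--         return None
--     it = iter(resp)
--     pairs = [(a | b << 8, c | d << 8) for a, b, c, d in zip(it, it, it, it)]
--     if (0, 0) in pairs:
--         z = pairs.index((0, 0))
--         kept = pairs[: z + 1] + [p for p in pairs[z + 1 :] if p != (0, 0)]
--     else:
--         kept = pairs
--     return ", ".join(f"slot={s}:{_EFFECT_ID_NAMES.get(e, f'0x{e:04X}')}" for e, s in kept)
-- ===== Notes on version B (the rewrite author's own statement) =====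
-- stated objective: alternative
-- what changed: Replaced A's indexed loop with a mutated seen_static flag by a split-based pipeline: chunk the bytes into records by consuming a shared iterator four at a time (zip truncates the tail), then locate the first all-zero record and build the kept list as prefix-up-to-it plus a zero-free filter of the rest, rendered by one join.
import Mathlib
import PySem

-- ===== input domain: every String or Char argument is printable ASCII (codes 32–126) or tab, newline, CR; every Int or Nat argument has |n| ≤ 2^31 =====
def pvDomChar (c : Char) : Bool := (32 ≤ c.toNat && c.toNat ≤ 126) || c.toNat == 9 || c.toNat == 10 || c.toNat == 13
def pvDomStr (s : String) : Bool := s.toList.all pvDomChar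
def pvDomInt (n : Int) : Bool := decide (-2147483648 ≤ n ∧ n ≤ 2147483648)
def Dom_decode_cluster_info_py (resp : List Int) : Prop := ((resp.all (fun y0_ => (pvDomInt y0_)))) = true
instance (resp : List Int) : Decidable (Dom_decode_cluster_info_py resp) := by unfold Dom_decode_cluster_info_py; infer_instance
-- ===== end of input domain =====

-- B replaces A's indexed loop with a seen_static flag by a split pipeline: chunk bytes into
-- records four at a time, split the record list at the first all-zero record, keep the prefix
-- verbatim and filter later zeros out (objective: alternative, same cost).

-- ===== PORT A =====
-- shared module context: the _EFFECT_ID_NAMES dict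
def pvEffectNames : PySem.Dict Int String :=
  ⟨[(0x0000, "Static"), (0x0001, "Effect 0x0001"), (0x0006, "Effect 0x0006"),
    (0x0007, "Effect 0x0007"), (0x000F, "Effect 0x000F"), (0x007F, "Effect 0x007F")]⟩

def pvHexDigit (d : Nat) : Char := if d < 10 then Char.ofNat (48 + d) else Char.ofNat (55 + d)

-- uppercase hex digits of a Nat (exact hand port of the digit part of format(n, 'X'))
def pvNatHex (n : Nat) : List Char :=
  if n < 16 then [pvHexDigit n]
  else pvNatHex (n / 16) ++ [pvHexDigit (n % 16)]
  decreasing_by exact Nat.div_lt_self (by omega) (by omega)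

-- exact hand port of f"0x{eid:04X}": '-' in front for negatives, zero-padded to total width 4
-- (the sign stays in front of the padding, which is exactly PySem.Chars.zfill's rule)
def pvHex04X (eid : Int) : String :=
  String.ofList ('0' :: 'x' :: PySem.Chars.zfill ((if eid < 0 then ['-'] else []) ++ pvNatHex eid.natAbs) 4)

-- f"slot={slot}:{name}" with name = _EFFECT_ID_NAMES.get(eid, f"0x{eid:04X}")
def pvEntry (eid slot : Int) : String :=
  "slot=" ++ PySem.Int.toStr slot ++ ":" ++ PySem.Dict.getD pvEffectNames eid (pvHex04X eid)

-- A's loop: effects/seen_static accumulator over range(0, len(resp)-3, 4); the range's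
-- indices are always within bounds, so pyGetD's default 0 is never used
def pvLoopA (resp : List Int) : List String × Bool :=
  (PySem.List.pyRange 0 ((resp.length : Int) - 3) 4).foldl
    (fun (st : List String × Bool) i =>
      let eid := PySem.Int.bor (PySem.List.pyGetD resp i 0) (PySem.List.pyGetD resp (i + 1) 0 <<< (8 : Nat))
      let slot := PySem.Int.bor (PySem.List.pyGetD resp (i + 2) 0) (PySem.List.pyGetD resp (i + 3) 0 <<< (8 : Nat))
      if eid = 0 ∧ slot = 0 then
        if st.2 then st else (st.1 ++ [pvEntry eid slot], true)
      else (st.1 ++ [pvEntry eid slot], st.2))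
    ([], false)

def decode_cluster_info_py (resp : List Int) : Option String :=
  if resp = [] ∨ (resp.length : Int) < 4 then none
  else if (pvLoopA resp).1 = [] then none
  else some (PySem.Str.join ", " (pvLoopA resp).1)

-- ===== PORT B =====
-- pairs = [(a | b << 8, c | d << 8) for a, b, c, d in zip(it, it, it, it)]: the shared
-- iterator hands out four bytes per tuple and zip stops when fewer than four remain —
-- ported as structural recursion consuming four list heads at a time
def pvPairsB : List Int → List (Int × Int)
  | a :: b :: c :: d :: t =>
      (PySem.Int.bor a (b <<< (8 : Nat)), PySem.Int.bor c (d <<< (8 : Nat))) :: pvPairsB t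
  | _ => []

-- if (0,0) in pairs: z = pairs.index((0,0)); kept = pairs[:z+1] + [p for p in pairs[z+1:] if p != (0,0)]
-- else: kept = pairs   — index? is some exactly on the 'in' branch (PySem.List.index?_isSome_iff)
def pvKeptB (pairs : List (Int × Int)) : List (Int × Int) :=
  match PySem.List.index? pairs ((0 : Int), (0 : Int)) with
  | some z =>
      PySem.List.slice pairs none (some ((z : Int) + 1)) ++
        (PySem.List.slice pairs (some ((z : Int) + 1)) none).filter
          (fun p => p ≠ ((0 : Int), (0 : Int)))
  | none => pairs

def decode_cluster_info_py_alt (resp : List Int) : Option String :=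
  if resp = [] ∨ (resp.length : Int) < 4 then none
  else some (PySem.Str.join ", " ((pvKeptB (pvPairsB resp)).map (fun p => pvEntry p.1 p.2)))

-- ===== PRECONDITION & SPEC =====
def Spec_decode_cluster_info_py (resp : List Int) (out : Option String) : Prop := out = decode_cluster_info_py_alt resp
instance (resp : List Int) (out : Option String) : Decidable (Spec_decode_cluster_info_py resp out) := by unfold Spec_decode_cluster_info_py; infer_instance

-- ===== CLAIM (what is proved, stated in full; the proofs are below) =====
def Claim_equal_decode_cluster_info_py : Prop := ∀ (resp : List Int), Dom_decode_cluster_info_py resp → Spec_decode_cluster_info_py resp (decode_cluster_info_py resp)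

-- ===== LEMMAS AND PROOFS =====

-- one record: (effect_id, slot) read little-endian at byte offset i
def pvPair (resp : List Int) (i : Int) : Int × Int :=
  (PySem.Int.bor (PySem.List.pyGetD resp i 0) (PySem.List.pyGetD resp (i + 1) 0 <<< (8 : Nat)),
   PySem.Int.bor (PySem.List.pyGetD resp (i + 2) 0) (PySem.List.pyGetD resp (i + 3) 0 <<< (8 : Nat)))

-- A's loop body on a decoded record
def pvStep (st : List String × Bool) (p : Int × Int) : List String × Bool :=
  if p = ((0 : Int), (0 : Int)) then
    if st.2 then st else (st.1 ++ [pvEntry p.1 p.2], true)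
  else (st.1 ++ [pvEntry p.1 p.2], st.2)

-- reference: the entries kept, given whether a zero record was already seen
def pvKeep : List (Int × Int) → Bool → List String
  | [], _ => []
  | p :: t, seen =>
    if p = ((0 : Int), (0 : Int)) then
      if seen then pvKeep t true else pvEntry p.1 p.2 :: pvKeep t true
    else pvEntry p.1 p.2 :: pvKeep t seen

lemma pvFoldA (ps : List (Int × Int)) (acc : List String) (seen : Bool) :
    ps.foldl pvStep (acc, seen) =
      (acc ++ pvKeep ps seen, seen || ps.any fun p => decide (p = ((0 : Int), (0 : Int)))) := by
  induction ps generalizing acc seen with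
  | nil => simp [pvKeep]
  | cons p t ih =>
    by_cases hp : p = ((0 : Int), (0 : Int))
    · cases seen <;> simp [pvStep, pvKeep, hp, ih]
    · simp [pvStep, pvKeep, hp, ih]

-- both index schemes enumerate the same records
lemma pvRangeA (resp : List Int) (hL : 4 ≤ (resp.length : Int)) :
    PySem.List.pyRange 0 ((resp.length : Int) - 3) 4
      = (List.range (resp.length / 4)).map (fun k : Nat => 4 * (k : Int)) := by
  rw [PySem.List.pyRange_of_pos _ _ (by norm_num : (0:Int) < 4)]
  rw [if_pos (by omega : (0:Int) < (resp.length : Int) - 3)]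
  rw [show (((resp.length : Int) - 3 - 0 + 4 - 1) / 4).toNat = resp.length / 4 by omega]
  exact List.map_congr_left (fun k _ => by omega)

lemma pvLoopA_eq (resp : List Int) (hL : 4 ≤ (resp.length : Int)) :
    pvLoopA resp =
      ((List.range (resp.length / 4)).map (fun k : Nat => pvPair resp (4 * (k : Int)))).foldl
        pvStep ([], false) := by
  unfold pvLoopA
  rw [pvRangeA resp hL, List.foldl_map, List.foldl_map]
  congr 1
  funext st k
  simp only [pvStep, pvPair, Prod.mk.injEq]

-- the chunker reads the same records as A's index arithmetic
lemma pvChunks_eq (resp : List Int) :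
    (List.range (resp.length / 4)).map (fun k : Nat => pvPair resp (4 * (k : Int))) = pvPairsB resp := by
  induction resp using pvPairsB.induct with
  | case1 a b c d t ih =>
    have hlen : (a :: b :: c :: d :: t).length / 4 = t.length / 4 + 1 := by
      simp [List.length]; omega
    rw [hlen, List.range_succ_eq_map, List.map_cons, List.map_map]
    have key0 : ∀ (m m' : Nat), m = m' + 4 →
        PySem.List.pyGetD (a :: b :: c :: d :: t) ((m : Nat) : Int) 0
          = PySem.List.pyGetD t ((m' : Nat) : Int) 0 := by
      intro m m' hm
      rw [PySem.List.pyGetD_natCast, PySem.List.pyGetD_natCast, hm]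
      simp [show m' + 4 = m' + 1 + 1 + 1 + 1 by omega]
    have key : ∀ (m m' : Nat) (j : Int), m = m' + 4 → 0 ≤ j →
        PySem.List.pyGetD (a :: b :: c :: d :: t) (((m : Nat) : Int) + j) 0
          = PySem.List.pyGetD t (((m' : Nat) : Int) + j) 0 := by
      intro m m' j hm hj
      obtain ⟨n, rfl⟩ := Int.eq_ofNat_of_zero_le hj
      rw [show ((m : Int) + (n : Int)) = ((m + n : Nat) : Int) by push_cast; ring,
          show ((m' : Int) + (n : Int)) = ((m' + n : Nat) : Int) by push_cast; ring]
      exact key0 _ _ (by omega)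
    have h0 : pvPair (a :: b :: c :: d :: t) (4 * ((0 : Nat) : Int))
        = (PySem.Int.bor a (b <<< (8 : Nat)), PySem.Int.bor c (d <<< (8 : Nat))) := by
      norm_num [pvPair, PySem.List.pyGetD_ofNat', List.getD_cons_succ, List.getD_cons_zero]
    have hsh : ∀ k : Nat, pvPair (a :: b :: c :: d :: t) (4 * (((k + 1 : Nat)) : Int))
        = pvPair t (4 * (k : Int)) := by
      intro k
      have e1 : (4 * (((k + 1 : Nat)) : Int)) = ((4 * k + 4 : Nat) : Int) := by push_cast; ring
      have e2 : (4 * (k : Int)) = ((4 * k : Nat) : Int) := by push_cast; ring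
      simp only [pvPair, e1, e2]
      rw [key0 (4 * k + 4) (4 * k) (by omega),
          key (4 * k + 4) (4 * k) 1 (by omega) (by norm_num),
          key (4 * k + 4) (4 * k) 2 (by omega) (by norm_num),
          key (4 * k + 4) (4 * k) 3 (by omega) (by norm_num)]
    rw [pvPairsB, ← ih, h0]
    congr 1
    exact List.map_congr_left (fun k _ => hsh k)
  | case2 t h =>
    cases t with
    | nil => simp [pvPairsB]
    | cons a t1 => cases t1 with
      | nil => simp [pvPairsB]
      | cons b t2 => cases t2 with
        | nil => simp [pvPairsB]
        | cons c t3 => cases t3 with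
          | nil => simp [pvPairsB]
          | cons d t4 => exact absurd rfl (h a b c d t4)

-- entries kept after the first zero record = a zero-free filter
lemma pvKeepTrue (ps : List (Int × Int)) :
    pvKeep ps true = (ps.filter (fun p => p ≠ ((0 : Int), (0 : Int)))).map (fun p => pvEntry p.1 p.2) := by
  induction ps with
  | nil => simp [pvKeep]
  | cons p t ih =>
    by_cases hp : p = ((0 : Int), (0 : Int)) <;> simp [pvKeep, hp, ih]

-- before any zero record everything is kept verbatim
lemma pvKeepNoZero (ps : List (Int × Int)) (h : ((0 : Int), (0 : Int)) ∉ ps) :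
    pvKeep ps false = ps.map (fun p => pvEntry p.1 p.2) := by
  induction ps with
  | nil => simp [pvKeep]
  | cons p t ih =>
    have hp : p ≠ ((0 : Int), (0 : Int)) := fun he => h (he ▸ List.mem_cons_self)
    simp only [pvKeep, if_neg hp]
    exact congrArg _ (ih (fun hm => h (List.mem_cons_of_mem _ hm)))

-- B's split-and-filter kept list renders exactly A's flag-loop output
lemma pvKeptB_eq (ps : List (Int × Int)) :
    (pvKeptB ps).map (fun p => pvEntry p.1 p.2) = pvKeep ps false := by
  induction ps with
  | nil => simp [pvKeptB, pvKeep, PySem.List.index?]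
  | cons p t ih =>
    by_cases hp : p = ((0 : Int), (0 : Int))
    · subst hp
      have hc : pvKeptB (((0 : Int), (0 : Int)) :: t)
          = ((0 : Int), (0 : Int)) :: t.filter (fun p => p ≠ ((0 : Int), (0 : Int))) := by
        have h1 : pvKeptB (((0 : Int), (0 : Int)) :: t)
            = PySem.List.slice (((0 : Int), (0 : Int)) :: t) none (some (((0 : Nat) : Int) + 1)) ++
              (PySem.List.slice (((0 : Int), (0 : Int)) :: t) (some (((0 : Nat) : Int) + 1)) none).filter
                (fun p => p ≠ ((0 : Int), (0 : Int))) := by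
          unfold pvKeptB; rw [PySem.List.index?_cons_self]
        rw [h1, show ((0 : Nat) : Int) + 1 = (((1 : Nat)) : Int) by norm_num,
            PySem.List.slice_to_natCast, PySem.List.slice_from_natCast]
        simp
      rw [hc, List.map_cons, pvKeep, if_pos rfl]
      simp [pvKeepTrue]
    · cases hz : PySem.List.index? t ((0 : Int), (0 : Int)) with
      | none =>
        have hc : pvKeptB (p :: t) = p :: t := by
          unfold pvKeptB
          rw [PySem.List.index?_cons_of_ne _ hp, hz]
          rfl
        rw [hc, List.map_cons, pvKeep, if_neg hp,
            pvKeepNoZero t (Iff.mp (PySem.List.index?_eq_none_iff _ _) hz)]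
      | some z =>
        have ht : pvKeptB t = List.take (z + 1) t ++
            (List.drop (z + 1) t).filter (fun p => p ≠ ((0 : Int), (0 : Int))) := by
          have h1 : pvKeptB t = PySem.List.slice t none (some ((z : Int) + 1)) ++
              (PySem.List.slice t (some ((z : Int) + 1)) none).filter
                (fun p => p ≠ ((0 : Int), (0 : Int))) := by
            unfold pvKeptB; rw [hz]
          rw [h1, show ((z : Nat) : Int) + 1 = (((z + 1 : Nat)) : Int) by push_cast; ring,
              PySem.List.slice_to_natCast, PySem.List.slice_from_natCast]
        have hc : pvKeptB (p :: t) = List.take (z + 2) (p :: t) ++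
            (List.drop (z + 2) (p :: t)).filter (fun p => p ≠ ((0 : Int), (0 : Int))) := by
          have h1 : pvKeptB (p :: t)
              = PySem.List.slice (p :: t) none (some ((((z + 1 : Nat)) : Int) + 1)) ++
                (PySem.List.slice (p :: t) (some ((((z + 1 : Nat)) : Int) + 1)) none).filter
                  (fun p => p ≠ ((0 : Int), (0 : Int))) := by
            unfold pvKeptB
            rw [PySem.List.index?_cons_of_ne _ hp, hz]
            rfl
          rw [h1, show (((z + 1 : Nat)) : Int) + 1 = (((z + 2 : Nat)) : Int) by push_cast; ring,
              PySem.List.slice_to_natCast, PySem.List.slice_from_natCast]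
        rw [hc, show z + 2 = (z + 1) + 1 by omega]
        simp only [List.take_succ_cons, List.drop_succ_cons, List.cons_append, List.map_cons]
        rw [pvKeep, if_neg hp, ← ih, ht]

-- A's effects list is nonempty whenever there is at least one record
lemma pvKeep_ne_nil (p : Int × Int) (t : List (Int × Int)) : pvKeep (p :: t) false ≠ [] := by
  by_cases hp : p = ((0 : Int), (0 : Int)) <;> simp [pvKeep, hp]

lemma pvPairsB_cons (a b c d : Int) (t : List Int) :
    pvPairsB (a :: b :: c :: d :: t)
      = (PySem.Int.bor a (b <<< (8 : Nat)), PySem.Int.bor c (d <<< (8 : Nat))) :: pvPairsB t := rfl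

-- ===== VERDICT (by name: the statement is the Claim_ definition above) =====
theorem decode_cluster_info_py_spec : Claim_equal_decode_cluster_info_py := by
  intro resp _
  unfold Spec_decode_cluster_info_py decode_cluster_info_py decode_cluster_info_py_alt
  by_cases hg : resp = [] ∨ (resp.length : Int) < 4
  · rw [if_pos hg, if_pos hg]
  · rw [if_neg hg, if_neg hg]
    have hL : 4 ≤ (resp.length : Int) := by
      have := (not_or.mp hg).2; omega
    have hmain : (pvLoopA resp).1 = (pvKeptB (pvPairsB resp)).map (fun p => pvEntry p.1 p.2) := by
      rw [pvLoopA_eq resp hL, pvFoldA, pvChunks_eq, pvKeptB_eq]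
      simp
    have hne : (pvLoopA resp).1 ≠ [] := by
      rw [pvLoopA_eq resp hL, pvFoldA, pvChunks_eq]
      simp only [List.nil_append]
      obtain ⟨a, b, c, d, t, he⟩ :
          ∃ a b c d t, resp = a :: b :: c :: d :: t := by
        match resp, hL with
        | a :: b :: c :: d :: t, _ => exact ⟨a, b, c, d, t, rfl⟩
      rw [he, pvPairsB_cons]
      exact pvKeep_ne_nil _ _
    rw [if_neg hne, hmain]
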